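-- pv_equiv track=rewrite | github.com/darklord1611/leetcode_template | leetcode_daily/27_03_2025/solution.py | minimumIndex
-- ===== SOURCE A (Python) =====
-- from collections import defaultdict
-- from typing import List
--
-- def minimumIndex(nums: List[int]) -> int:
-- 	# both arrays after split have the same dominant element -> original array also have a single dominant element
--
-- 	freq = defaultdict(int)
-- 	n = len(nums)
-- 	max_num = -1
-- 	cur_max_count = 0
-- 	for num in nums:
-- 		freq[num] += 1
-- 		if freq[num] > cur_max_count:
-- 			cur_max_count = freq[num]
-- 			max_num = num
--
-- 	# got the most frequent number in the array -> now loop through each index and check if the split is valid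
-- 	cur_max_count = 0
--
-- 	for i in range(0, n - 1):
-- 		if nums[i] == max_num:
-- 			cur_max_count += 1
--
-- 		if cur_max_count >= (i + 1) // 2 + 1:  # first part of array after split
-- 			if freq[max_num] - cur_max_count >= (n - i - 1) // 2 + 1:  # 2nd part
-- 				return i
--
-- 	return -1
-- ===== SOURCE B (Python) =====
-- def minimumIndex(nums):
--     n = len(nums)
--     # Boyer-Moore voting: single pass, O(1) extra space, no hash map
--     cand, votes = None, 0
--     for x in nums:
--         if votes == 0:
--             cand, votes = x, 1
--         elif x == cand:
--             votes += 1
--         else: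
--             votes -= 1
--     total = nums.count(cand)
--     if 2 * total <= n:
--         return -1  # no dominant element -> no valid split
--     left = 0
--     for i in range(n - 1):
--         if nums[i] == cand:
--             left += 1
--         if 2 * left > i + 1 and 2 * (total - left) > n - i - 1:
--             return i
--     return -1
-- ===== Notes on version B (the rewrite author's own statement) =====
-- stated objective: faster
-- what changed: Replaces A's frequency-dictionary pass with Boyer-Moore voting plus one list.count pass, returns -1 early when no strict-majority element exists, and replaces the floor-division split tests with multiplication-form tests.
import Mathlib
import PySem

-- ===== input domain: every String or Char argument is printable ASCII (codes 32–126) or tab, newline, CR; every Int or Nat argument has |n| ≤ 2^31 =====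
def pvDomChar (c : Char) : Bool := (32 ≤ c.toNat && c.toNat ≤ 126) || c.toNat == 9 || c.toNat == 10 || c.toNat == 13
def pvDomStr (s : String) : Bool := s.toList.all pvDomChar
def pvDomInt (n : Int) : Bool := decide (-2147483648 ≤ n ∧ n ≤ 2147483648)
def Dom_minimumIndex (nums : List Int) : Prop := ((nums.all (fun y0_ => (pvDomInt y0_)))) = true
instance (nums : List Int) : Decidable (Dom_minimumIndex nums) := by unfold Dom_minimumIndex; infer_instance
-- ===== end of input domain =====

-- B replaces A's frequency dictionary with Boyer-Moore voting plus one counting pass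
-- and an early -1 return when no strict-majority element exists (objective: faster, constant factor).

-- ===== PORT A =====
-- one step of A's first for-loop: freq[num] += 1, then update (cur_max_count, max_num)
def aStep (s : PySem.Dict Int Int × Int × Int) (num : Int) : PySem.Dict Int Int × Int × Int :=
  let freq := s.1.modify num 0 (· + 1)
  if freq.getD num 0 > s.2.1 then (freq, freq.getD num 0, num) else (freq, s.2.1, s.2.2)

-- A's second for-loop over i ∈ range(0, n-1), carrying cur_max_count
def aLoop (nums : List Int) (freq : PySem.Dict Int Int) (max_num n : Int) :
    List Int → Int → Int
  | [], _ => -1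
  | i :: rest, cmc =>
    let cmc := if PySem.List.pyGetD nums i 0 == max_num then cmc + 1 else cmc
    if cmc ≥ PySem.Int.floordiv (i + 1) 2 + 1 then
      if freq.getD max_num 0 - cmc ≥ PySem.Int.floordiv (n - i - 1) 2 + 1 then i
      else aLoop nums freq max_num n rest cmc
    else aLoop nums freq max_num n rest cmc

def minimumIndex (nums : List Int) : Int :=
  let n : Int := (nums.length : Int)
  let s := nums.foldl aStep (PySem.Dict.empty, 0, -1)
  aLoop nums s.1 s.2.2 n (PySem.List.pyRange 0 (n - 1) 1) 0

-- ===== PORT B =====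
-- one step of Boyer-Moore voting
def bVote (s : Option Int × Int) (x : Int) : Option Int × Int :=
  if s.2 == 0 then (some x, 1)
  else if some x == s.1 then (s.1, s.2 + 1)
  else (s.1, s.2 - 1)

-- B's prefix loop over i ∈ range(n-1), carrying `left`
def bLoop (nums : List Int) (cand : Option Int) (total n : Int) :
    List Int → Int → Int
  | [], _ => -1
  | i :: rest, left =>
    let left := if (some (PySem.List.pyGetD nums i 0) : Option Int) == cand then left + 1 else left
    if 2 * left > i + 1 ∧ 2 * (total - left) > n - i - 1 then i
    else bLoop nums cand total n rest left

def minimumIndex_alt (nums : List Int) : Int :=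
  let n : Int := (nums.length : Int)
  let cv := nums.foldl bVote (none, 0)
  let total : Int := match cv.1 with
    | some c => PySem.List.count nums c
    | none => 0
  if 2 * total ≤ n then -1
  else bLoop nums cv.1 total n (PySem.List.pyRange 0 (n - 1) 1) 0

-- ===== PRECONDITION & SPEC =====
def Spec_minimumIndex (nums : List Int) (out : Int) : Prop := out = minimumIndex_alt nums
instance (nums : List Int) (out : Int) : Decidable (Spec_minimumIndex nums out) := by unfold Spec_minimumIndex; infer_instance

-- ===== CLAIM (what is proved, stated in full; the proofs are below) =====
def Claim_equal_minimumIndex : Prop := ∀ (nums : List Int), Dom_minimumIndex nums → Spec_minimumIndex nums (minimumIndex nums)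

-- ===== LEMMAS AND PROOFS =====

-- the dict component of A's first fold is the plain counter fold
lemma aFold_fst (l : List Int) :
    ∀ s : PySem.Dict Int Int × Int × Int,
      (l.foldl aStep s).1 = l.foldl (fun d x => d.modify x 0 (· + 1)) s.1 := by
  induction l with
  | nil => intro s; rfl
  | cons y t ih =>
    intro s
    simp only [List.foldl_cons, ih]
    simp only [aStep]
    split <;> rfl

-- invariant of A's first fold: cur_max_count = freq[max_num] and it dominates every count
lemma aFold_inv (l : List Int) :
    ∀ s : PySem.Dict Int Int × Int × Int,
      s.2.1 = s.1.getD s.2.2 0 → (∀ x, s.1.getD x 0 ≤ s.2.1) →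
      (l.foldl aStep s).2.1 = (l.foldl aStep s).1.getD (l.foldl aStep s).2.2 0 ∧
        (∀ x, (l.foldl aStep s).1.getD x 0 ≤ (l.foldl aStep s).2.1) := by
  induction l with
  | nil => intro s h1 h2; exact ⟨h1, h2⟩
  | cons y t ih =>
    intro s h1 h2
    simp only [List.foldl_cons]
    apply ih
    · simp only [aStep]
      split
      · rfl
      · rename_i hle
        simp [PySem.Dict.getD_modify] at hle ⊢
        by_cases hmy : s.2.2 = y
        · exfalso
          rw [hmy] at h1
          omega
        · rw [if_neg hmy]
          exact h1
    · intro x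
      simp only [aStep]
      split
      · rename_i hgt
        simp [PySem.Dict.getD_modify] at hgt ⊢
        have hx := h2 x
        split <;> omega
      · rename_i hle
        simp [PySem.Dict.getD_modify] at hle ⊢
        have hx := h2 x
        split <;> omega

-- Boyer-Moore voting invariant
lemma bm_inv (l : List Int) :
    ∀ (c : Option Int) (v : Int), 0 ≤ v →
      0 ≤ (l.foldl bVote (c, v)).2 ∧
      ∀ x : Int,
        2 * (l.count x : Int) + (if c = some x then 2 * v else 0) - v
          ≤ (l.length : Int) + (if (l.foldl bVote (c, v)).1 = some x then 2 * (l.foldl bVote (c, v)).2 else 0)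
            - (l.foldl bVote (c, v)).2 := by
  induction l with
  | nil =>
    intro c v hv
    refine ⟨hv, fun x => ?_⟩
    simp
  | cons y t ih =>
    intro c v hv
    have step : ∀ (c' : Option Int) (v' : Int), bVote (c, v) y = (c', v') → 0 ≤ v' →
        (∀ x : Int,
          2 * ((y :: t).count x : Int) + (if c = some x then 2 * v else 0) - v
            ≤ 2 * (t.count x : Int) + (if c' = some x then 2 * v' else 0) - v' + 1) →
        0 ≤ ((y :: t).foldl bVote (c, v)).2 ∧
        ∀ x : Int,
          2 * ((y :: t).count x : Int) + (if c = some x then 2 * v else 0) - v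
            ≤ ((y :: t).length : Int)
              + (if ((y :: t).foldl bVote (c, v)).1 = some x then 2 * ((y :: t).foldl bVote (c, v)).2 else 0)
              - ((y :: t).foldl bVote (c, v)).2 := by
      intro c' v' hstep hv' hgain
      obtain ⟨hnn, hbd⟩ := ih c' v' hv'
      simp only [List.foldl_cons, hstep]
      refine ⟨hnn, fun x => ?_⟩
      have hb := hbd x
      have hg := hgain x
      simp only [List.length_cons]
      omega
    by_cases h0 : v = 0
    · subst h0
      apply step (some y) 1 (by simp [bVote]) (by omega)
      intro x
      simp only [List.count_cons]
      by_cases hxy : x = y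
      · subst hxy
        rw [if_pos (by simp : (x == x) = true), if_pos (rfl : (some x : Option Int) = some x)]
        by_cases hcx : c = some x
        · rw [if_pos hcx]; omega
        · rw [if_neg hcx]; omega
      · rw [if_neg (by simp only [beq_iff_eq]; omega : ¬ ((y == x) = true)),
            if_neg (by simp only [Option.some.injEq]; omega : ¬ ((some y : Option Int) = some x))]
        by_cases hcx : c = some x
        · rw [if_pos hcx]; omega
        · rw [if_neg hcx]; omega
    · by_cases hyc : (some y : Option Int) = c
      · apply step c (v + 1) (by simp [bVote, h0, hyc]) (by omega)
        intro x
        simp only [List.count_cons]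
        by_cases hxy : x = y
        · subst hxy
          have hcx : c = some x := hyc.symm
          rw [if_pos (by simp : (x == x) = true), if_pos hcx, if_pos hcx]
          omega
        · rw [if_neg (by simp only [beq_iff_eq]; omega : ¬ ((y == x) = true))]
          by_cases hcx : c = some x
          · rw [if_pos hcx, if_pos hcx]; omega
          · rw [if_neg hcx, if_neg hcx]; omega
      · apply step c (v - 1) (by simp [bVote, h0, hyc]) (by omega)
        intro x
        simp only [List.count_cons]
        by_cases hxy : x = y
        · subst hxy
          have hcx : ¬ (c = some x) := fun h => hyc h.symm
          rw [if_pos (by simp : (x == x) = true), if_neg hcx, if_neg hcx]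
          omega
        · rw [if_neg (by simp only [beq_iff_eq]; omega : ¬ ((y == x) = true))]
          by_cases hcx : c = some x
          · rw [if_pos hcx, if_pos hcx]; omega
          · rw [if_neg hcx, if_neg hcx]; omega

-- A's second loop returns -1 when max_num is not a strict majority
lemma aLoop_no_majority (nums : List Int) (freq : PySem.Dict Int Int) (mn n : Int)
    (h : 2 * freq.getD mn 0 ≤ n) :
    ∀ (idxs : List Int) (cmc : Int), aLoop nums freq mn n idxs cmc = -1 := by
  intro idxs
  induction idxs with
  | nil => intro cmc; rfl
  | cons i rest ih =>
    intro cmc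
    simp only [aLoop]
    rw [PySem.Int.floordiv_eq_ediv_of_pos (by omega : (0:Int) < 2),
        PySem.Int.floordiv_eq_ediv_of_pos (by omega : (0:Int) < 2)]
    set cmc' := if (PySem.List.pyGetD nums i 0 == mn) = true then cmc + 1 else cmc with hc
    by_cases h1 : cmc' ≥ (i + 1) / 2 + 1
    · rw [if_pos h1]
      by_cases h2 : freq.getD mn 0 - cmc' ≥ (n - i - 1) / 2 + 1
      · rw [if_pos h2]
        omega
      · rw [if_neg h2]
        exact ih _
    · rw [if_neg h1]
      exact ih _

-- the two prefix loops agree when run with the same candidate and total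
lemma loops_eq (nums : List Int) (freq : PySem.Dict Int Int) (mn n total : Int)
    (ht : total = freq.getD mn 0) :
    ∀ (idxs : List Int) (cmc : Int),
      aLoop nums freq mn n idxs cmc = bLoop nums (some mn) total n idxs cmc := by
  intro idxs
  induction idxs with
  | nil => intro cmc; rfl
  | cons i rest ih =>
    intro cmc
    have key : ∀ w : Int,
        (if w ≥ PySem.Int.floordiv (i + 1) 2 + 1 then
          if freq.getD mn 0 - w ≥ PySem.Int.floordiv (n - i - 1) 2 + 1 then i
          else aLoop nums freq mn n rest w
         else aLoop nums freq mn n rest w)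
        = (if 2 * w > i + 1 ∧ 2 * (total - w) > n - i - 1 then i
           else bLoop nums (some mn) total n rest w) := by
      intro w
      rw [PySem.Int.floordiv_eq_ediv_of_pos (by omega : (0:Int) < 2),
          PySem.Int.floordiv_eq_ediv_of_pos (by omega : (0:Int) < 2), ← ht]
      by_cases h1 : 2 * w > i + 1 ∧ 2 * (total - w) > n - i - 1
      · rw [if_pos h1,
            if_pos (by omega : w ≥ (i + 1) / 2 + 1),
            if_pos (by omega : total - w ≥ (n - i - 1) / 2 + 1)]
      · rw [if_neg h1]
        by_cases h2 : w ≥ (i + 1) / 2 + 1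
        · rw [if_pos h2, if_neg (by omega : ¬ total - w ≥ (n - i - 1) / 2 + 1)]
          exact ih _
        · rw [if_neg h2]
          exact ih _
    by_cases hb : PySem.List.pyGetD nums i 0 = mn
    · have e1 : (PySem.List.pyGetD nums i 0 == mn) = true := by simp [hb]
      have e2 : ((some (PySem.List.pyGetD nums i 0) : Option Int) == some mn) = true := by simp [hb]
      simp only [aLoop, bLoop, e1, e2, if_true]
      exact key (cmc + 1)
    · have e1 : (PySem.List.pyGetD nums i 0 == mn) = false := by simp [hb]
      have e2 : ((some (PySem.List.pyGetD nums i 0) : Option Int) == some mn) = false := by simp [hb]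
      simp only [aLoop, bLoop, e1, e2, if_false, Bool.false_eq_true]
      exact key cmc

-- ===== VERDICT (by name: the statement is the Claim_ definition above) =====
theorem minimumIndex_spec : Claim_equal_minimumIndex := by
  intro nums _
  unfold Spec_minimumIndex minimumIndex minimumIndex_alt
  simp only
  set n : Int := (nums.length : Int) with hn
  set s := nums.foldl aStep (PySem.Dict.empty, 0, -1) with hs
  set cv := nums.foldl bVote (none, 0) with hcv
  -- A's dict is the counter
  have hdict : ∀ x, s.1.getD x 0 = (nums.count x : Int) := by
    intro x
    rw [hs, aFold_fst]
    have := PySem.Dict.getD_foldl_modify_add_one (l := nums) (d := PySem.Dict.empty) (v := x)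
    simpa using this
  obtain ⟨hmc, hmax⟩ := aFold_inv nums (PySem.Dict.empty, 0, -1) (by simp) (by simp)
  rw [← hs] at hmc hmax
  obtain ⟨hvnn, hbm⟩ := bm_inv nums none 0 le_rfl
  rw [← hcv] at hvnn hbm
  by_cases hmaj : 2 * s.1.getD s.2.2 0 > n
  · -- A's max_num is a strict majority, so B's candidate is exactly it
    have hcand : cv.1 = some s.2.2 := by
      by_contra hne
      have := hbm s.2.2
      rw [if_neg hne, if_neg (by simp)] at this
      rw [hdict] at hmaj
      omega
    have htotal : (match cv.1 with
        | some c => PySem.List.count nums c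
        | none => (0 : Int)) = s.1.getD s.2.2 0 := by
      rw [hcand]
      simp only [PySem.List.count_eq, hdict]
    rw [htotal]
    rw [if_neg (by omega)]
    rw [hcand]
    exact loops_eq nums s.1 s.2.2 n _ rfl _ _
  · -- no strict majority: both return -1
    rw [aLoop_no_majority nums s.1 s.2.2 n (by omega)]
    cases hc1 : cv.1 with
    | none => simp only; rw [if_pos (by omega : 2 * (0:Int) ≤ n)]
    | some c =>
      simp only
      have hle : (nums.count c : Int) ≤ s.1.getD s.2.2 0 := by
        rw [← hmc] at *
        have := hmax c
        rw [hdict] at this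
        omega
      rw [if_pos (by rw [PySem.List.count_eq]; omega)]
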